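-- pv_equiv track=rewrite | github.com/nrclark/kinetis-eval | kicad/scripts/annotate_pcb.py | calculate_remaps
-- ===== SOURCE A (Python) =====
-- def calculate_remaps(records):
--     """ Adds a record entry to each record indicating its new remapped value.
--     The record list should already have been sorted prior to using this
--     function. """
--
--     comp_type = ""
--     index = 0
--
--     # pylint: disable=invalid-name, consider-using-enumerate
--     for x in range(len(records)):
--         if records[x][3] != comp_type:
--             comp_type = records[x][3]
--             index = 0
--         index = index + 1
--         records[x].append(comp_type + str(index))
--     return records
-- ===== SOURCE B (Python) =====
-- def calculate_remaps(records):
--     """ Adds a record entry to each record indicating its new remapped value.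
--     The record list should already have been sorted prior to using this
--     function. """
--     n = len(records)
--     i = 0
--     while i < n:
--         key = records[i][3]
--         j = i + 1
--         while j < n and records[j][3] == key:
--             j += 1
--         for pos, rec in enumerate(records[i:j], 1):
--             rec.append(key + str(pos))
--         i = j
--     return records
-- ===== Notes on version B (the rewrite author's own statement) =====
-- stated objective: alternative
-- what changed: B replaces A's single running-state loop (comp_type/index carried across every record) with a two-level run decomposition: an outer scan finds each maximal run of equal component type, then an inner enumerate(..., 1) labels that run; no cross-record counter state is kept.
import Mathlib
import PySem

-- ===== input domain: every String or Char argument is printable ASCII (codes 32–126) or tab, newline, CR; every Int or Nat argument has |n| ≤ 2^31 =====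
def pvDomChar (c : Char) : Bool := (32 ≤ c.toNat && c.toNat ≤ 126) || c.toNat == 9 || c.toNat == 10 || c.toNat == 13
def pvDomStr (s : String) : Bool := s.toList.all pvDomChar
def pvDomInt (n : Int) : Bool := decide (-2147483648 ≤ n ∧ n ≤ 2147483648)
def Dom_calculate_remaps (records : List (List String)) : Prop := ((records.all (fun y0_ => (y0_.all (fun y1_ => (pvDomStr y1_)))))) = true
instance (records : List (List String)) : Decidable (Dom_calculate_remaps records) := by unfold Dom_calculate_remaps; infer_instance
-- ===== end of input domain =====

-- B restructures A's single running-state loop into a per-run decomposition of the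
-- same cost; both Pythons mutate the record lists in place and return the same list
-- object — the equivalence proved here is about the returned value.

-- ===== PORT A =====
-- A's for-loop over range(len(records)) carrying (comp_type, index) state,
-- as a structural recursion over the records with that same state.
def calcA (comp_type : String) (index : Int) : List (List String) → List (List String)
  | [] => []
  | r :: rs =>
    let k := PySem.List.pyGetD r 3 ""          -- records[x][3]; Pre_ keeps it in range
    let comp_type' := if k ≠ comp_type then k else comp_type
    let index0 := if k ≠ comp_type then 0 else index
    let index' := index0 + 1
    (r ++ [comp_type' ++ PySem.Int.toStr index']) :: calcA comp_type' index' rs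

def calculate_remaps (records : List (List String)) : List (List String) :=
  calcA "" 0 records

-- ===== PORT B =====
-- Outer while-loop of Source B: split off the maximal run records[i:j] sharing records[i][3],
-- label it with enumerate(.., 1), continue at j.
def calcB : List (List String) → List (List String)
  | [] => []
  | r :: rs =>
    let key := PySem.List.pyGetD r 3 ""
    let run := rs.takeWhile (fun r' => PySem.List.pyGetD r' 3 "" == key)
    let rest := rs.dropWhile (fun r' => PySem.List.pyGetD r' 3 "" == key)
    ((PySem.List.enumerate (r :: run) 1).map (fun q => q.2 ++ [key ++ PySem.Int.toStr q.1]))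
      ++ calcB rest
termination_by xs => xs.length
decreasing_by
  simpa using Nat.lt_succ_of_le (List.length_dropWhile_le _ _)

def calculate_remaps_alt (records : List (List String)) : List (List String) :=
  calcB records

-- ===== PRECONDITION & SPEC =====
-- Pre_ excludes exactly the inputs where A raises IndexError: a record with fewer than 4 fields.
def Pre_calculate_remaps (records : List (List String)) : Prop :=
  ∀ r ∈ records, 3 < r.length
instance (records : List (List String)) : Decidable (Pre_calculate_remaps records) := by
  unfold Pre_calculate_remaps; infer_instance

def pvWitness_calculate_remaps : List (List String) :=
  [["1", "C1", "x", "cap"], ["2", "C2", "y", "cap"], ["3", "R1", "z", "res"]]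

def Spec_calculate_remaps (records : List (List String)) (out : List (List String)) : Prop := out = calculate_remaps_alt records
instance (records : List (List String)) (out : List (List String)) : Decidable (Spec_calculate_remaps records out) := by unfold Spec_calculate_remaps; infer_instance

-- ===== CLAIM (what is proved, stated in full; the proofs are below) =====
def Claim_equal_calculate_remaps : Prop := ∀ (records : List (List String)), Dom_calculate_remaps records → Pre_calculate_remaps records → Spec_calculate_remaps records (calculate_remaps records)

-- ===== LEMMAS AND PROOFS =====

def pvKey (r : List String) : String := PySem.List.pyGetD r 3 ""

-- A consumes a whole run of records whose key equals its current comp_type by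
-- just incrementing index, producing exactly B's enumerate labelling of the run.
lemma calcA_run (g : List (List String)) (rest : List (List String)) (k : String) (idx : Int)
    (hg : ∀ r ∈ g, pvKey r = k) :
    calcA k idx (g ++ rest)
      = (PySem.List.enumerate g (idx + 1)).map (fun q => q.2 ++ [k ++ PySem.Int.toStr q.1])
        ++ calcA k (idx + g.length) rest := by
  induction g generalizing idx with
  | nil => simp [PySem.List.enumerate_nil]
  | cons r g ih =>
    have hk : pvKey r = k := hg r (by simp)
    simp only [List.cons_append, calcA, pvKey] at *
    rw [hk]
    simp only [ne_eq, not_true_eq_false, if_false, PySem.List.enumerate_cons, List.map_cons]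
    rw [ih (idx + 1) (fun r' hr' => hg r' (List.mem_cons_of_mem _ hr'))]
    have : idx + 1 + (g.length : Int) = idx + (g.length + 1 : Nat) := by push_cast; ring
    simp [this]

-- With index 0, A's state branch produces the same step whether or not the key matches.
lemma calcA_zero_cons (ct : String) (r : List String) (rs : List (List String)) :
    calcA ct 0 (r :: rs)
      = (r ++ [pvKey r ++ PySem.Int.toStr 1]) :: calcA (pvKey r) 1 rs := by
  by_cases h : pvKey r = ct
  · simp [calcA, pvKey] at *; simp [h]
  · simp [calcA, pvKey] at *; simp [h]

-- After a run ends, the next record's key differs from A's comp_type, so A's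
-- branch resets the state regardless of the carried index.
lemma calcA_ne (ct : String) (idx : Int) (r : List String) (rs : List (List String))
    (h : pvKey r ≠ ct) :
    calcA ct idx (r :: rs) = calcA ct 0 (r :: rs) := by
  simp [calcA, pvKey] at *
  simp [h]

lemma calcA_eq_calcB : ∀ (n : Nat) (rs : List (List String)), rs.length ≤ n →
    ∀ ct, calcA ct 0 rs = calcB rs := by
  intro n
  induction n with
  | zero =>
    intro rs hlen ct
    rw [List.length_eq_zero_iff.mp (Nat.le_zero.mp hlen)]
    simp [calcA, calcB]
  | succ n ih =>
    intro rs hlen ct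
    match rs with
    | [] => simp [calcA, calcB]
    | r :: rs =>
      rw [calcA_zero_cons, calcB]
      set k := PySem.List.pyGetD r 3 "" with hkdef
      have hk : pvKey r = k := rfl
      rw [hk]
      set g := rs.takeWhile (fun r' => PySem.List.pyGetD r' 3 "" == k) with hg
      set rest := rs.dropWhile (fun r' => PySem.List.pyGetD r' 3 "" == k) with hrest
      have hsplit : rs = g ++ rest := (List.takeWhile_append_dropWhile).symm
      have hgk : ∀ r' ∈ g, pvKey r' = k := by
        intro r' hr'
        have := List.mem_takeWhile_imp (hg ▸ hr')
        simpa [pvKey] using this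
      have hrestlen : rest.length ≤ rs.length := List.length_dropWhile_le _ _
      have hrslen : rs.length ≤ n := Nat.lt_succ_iff.mp (by simpa using hlen)
      conv_lhs => rw [hsplit]
      rw [calcA_run g rest k 1 hgk]
      have htail : calcA k (1 + (g.length : Int)) rest = calcB rest := by
        match hr : rest with
        | [] => simp [calcA, calcB]
        | r' :: rest' =>
          have hd : List.dropWhile (fun r'' => PySem.List.pyGetD r'' 3 "" == k) rs
              = r' :: rest' := hrest.symm
          have hne : pvKey r' ≠ k := by
            have hnil : List.dropWhile (fun r'' => PySem.List.pyGetD r'' 3 "" == k) rs ≠ [] := by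
              rw [hd]; simp
            have := List.head_dropWhile_not
              (p := fun r'' => PySem.List.pyGetD r'' 3 "" == k) (l := rs) hnil
            simpa [pvKey, hd] using this
          rw [calcA_ne _ _ _ _ hne]
          exact ih (r' :: rest') (le_trans hrestlen hrslen) k
      rw [htail]
      simp [PySem.List.enumerate_cons]

theorem calculate_remaps_spec : Claim_equal_calculate_remaps := by
  intro records _ _
  unfold Spec_calculate_remaps calculate_remaps calculate_remaps_alt
  exact calcA_eq_calcB records.length records le_rfl ""
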